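-- pv_equiv track=rewrite | github.com/gmacgillivray/AdventOfCode2024 | AoC_2024_Puzzle 14b.py | plot_point_next_steps
-- ===== SOURCE A (Python) =====
-- from collections import defaultdict
--
-- def plot_point_next_steps(pts):
--
--     return_graph_points = defaultdict(list)
--
--     for i in range(len(pts)):
--         label = (pts[i][0],pts[i][1])
--         return_graph_points[label] = []
--
--         for j in range(len(pts)):
--             if [pts[i][0] + 1, pts[i][1]] == pts[j] or [pts[i][0] - 1, pts[i][1]] == pts[j] or [pts[i][0], pts[i][1] + 1] == pts[j] or [pts[i][0], pts[i][1] - 1] == pts[j]: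
--                 if pts[j] not in return_graph_points[label]:
--                     return_graph_points[label].append((pts[j][0],pts[j][1]))
--
--     return return_graph_points
-- ===== SOURCE B (Python) =====
-- def plot_point_next_steps(pts):
--     out = {}
--     for p in pts:
--         out[(p[0], p[1])] = []
--     for q in pts:
--         if len(q) == 2:
--             x, y = q
--             if (x + 1, y) in out: out[(x + 1, y)].append((x, y))
--             if (x - 1, y) in out: out[(x - 1, y)].append((x, y))
--             if (x, y + 1) in out: out[(x, y + 1)].append((x, y))
--             if (x, y - 1) in out: out[(x, y - 1)].append((x, y))
--     return out
-- ===== Notes on version B (the rewrite author's own statement) =====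
-- stated objective: faster
-- what changed: A scans all n points for each of the n points (all-pairs comparison); B builds the keyed dict in one pass and then, in a single second pass, appends each point to the lists of its at most 4 neighbouring keys via O(1) dict lookups.
import Mathlib
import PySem

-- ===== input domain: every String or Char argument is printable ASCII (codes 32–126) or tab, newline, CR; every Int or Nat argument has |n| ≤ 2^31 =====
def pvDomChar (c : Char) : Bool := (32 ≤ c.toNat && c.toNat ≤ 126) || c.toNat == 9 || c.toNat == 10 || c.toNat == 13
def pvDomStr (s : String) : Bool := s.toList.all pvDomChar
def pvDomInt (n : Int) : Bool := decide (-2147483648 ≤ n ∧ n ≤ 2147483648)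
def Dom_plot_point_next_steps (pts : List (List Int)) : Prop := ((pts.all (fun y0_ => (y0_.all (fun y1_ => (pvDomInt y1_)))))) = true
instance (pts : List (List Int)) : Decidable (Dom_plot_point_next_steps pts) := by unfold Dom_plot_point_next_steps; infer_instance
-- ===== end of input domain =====

-- B replaces A's all-pairs O(n^2) neighbour scan by a dict keyed on coordinates: one pass creates
-- the keys, a second pass appends each point to the lists of its at most 4 neighbouring keys (faster).

-- ===== PORT A =====
-- Python: a list value never compares equal to a tuple, so A's dedup test 'pts[j] not in …' is always true
def pyListEqPair (_q : List Int) (_t : Int × Int) : Bool := false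

-- body of A's inner 'for j' loop (literal)
def pvStepAInner (L : Int × Int) (d : PySem.Dict (Int × Int) (List (Int × Int))) (pj : List Int) :
    PySem.Dict (Int × Int) (List (Int × Int)) :=
  if pj = [L.1 + 1, L.2] ∨ pj = [L.1 - 1, L.2] ∨ pj = [L.1, L.2 + 1] ∨ pj = [L.1, L.2 - 1] then
    if ((d.getD L []).any (fun t => pyListEqPair pj t)) = false then
      d.modify L [] (· ++ [(PySem.List.pyGetD pj 0 0, PySem.List.pyGetD pj 1 0)])
    else d
  else d

-- body of A's outer 'for i' loop (literal): set label, reset its entry, run the inner loop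
def pvAStep (pts : List (List Int)) (d : PySem.Dict (Int × Int) (List (Int × Int))) (pi : List Int) :
    PySem.Dict (Int × Int) (List (Int × Int)) :=
  let label : Int × Int := (PySem.List.pyGetD pi 0 0, PySem.List.pyGetD pi 1 0)
  (PySem.List.pyRange 0 pts.length 1).foldl
    (fun d j => pvStepAInner label d (PySem.List.pyGetD pts j [])) (d.insert label [])

def plot_point_next_steps (pts : List (List Int)) : List (Int × Int × List (Int × Int)) :=
  let rgp : PySem.Dict (Int × Int) (List (Int × Int)) :=
    (PySem.List.pyRange 0 pts.length 1).foldl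
      (fun d i => pvAStep pts d (PySem.List.pyGetD pts i [])) PySem.Dict.empty
  rgp.items.map (fun kv => (kv.1.1, kv.1.2, kv.2))

-- ===== PORT B =====
def plot_point_next_steps_alt (pts : List (List Int)) : List (Int × Int × List (Int × Int)) :=
  let out : PySem.Dict (Int × Int) (List (Int × Int)) :=
    pts.foldl (fun d p => d.insert (PySem.List.pyGetD p 0 0, PySem.List.pyGetD p 1 0) []) PySem.Dict.empty
  let out := pts.foldl (fun d q =>
    match q with
    | [x, y] =>
      let d := if d.contains (x + 1, y) then d.modify (x + 1, y) [] (· ++ [(x, y)]) else d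
      let d := if d.contains (x - 1, y) then d.modify (x - 1, y) [] (· ++ [(x, y)]) else d
      let d := if d.contains (x, y + 1) then d.modify (x, y + 1) [] (· ++ [(x, y)]) else d
      if d.contains (x, y - 1) then d.modify (x, y - 1) [] (· ++ [(x, y)]) else d
    | _ => d) out
  out.items.map (fun kv => (kv.1.1, kv.1.2, kv.2))

-- ===== PRECONDITION & SPEC =====
-- Pre_ excludes exactly the inputs where the Python A raises IndexError: a point list with fewer than 2 coordinates.
def Pre_plot_point_next_steps (pts : List (List Int)) : Prop := ∀ p ∈ pts, 2 ≤ p.length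
instance (pts : List (List Int)) : Decidable (Pre_plot_point_next_steps pts) := by unfold Pre_plot_point_next_steps; infer_instance
def pvWitness_plot_point_next_steps : List (List Int) := [[0, 0], [1, 0], [5, 5]]

def Spec_plot_point_next_steps (pts : List (List Int)) (out : List (Int × Int × List (Int × Int))) : Prop := out = plot_point_next_steps_alt pts
instance (pts : List (List Int)) (out : List (Int × Int × List (Int × Int))) : Decidable (Spec_plot_point_next_steps pts out) := by unfold Spec_plot_point_next_steps; infer_instance

-- ===== CLAIM (what is proved, stated in full; the proofs are below) =====
def Claim_equal_plot_point_next_steps : Prop := ∀ (pts : List (List Int)), Dom_plot_point_next_steps pts → Pre_plot_point_next_steps pts → Spec_plot_point_next_steps pts (plot_point_next_steps pts)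

-- ===== LEMMAS AND PROOFS =====

def pvLab (p : List Int) : Int × Int := (PySem.List.pyGetD p 0 0, PySem.List.pyGetD p 1 0)
def pvAdj (k : Int × Int) (q : List Int) : Bool :=
  decide (q = [k.1 + 1, k.2] ∨ q = [k.1 - 1, k.2] ∨ q = [k.1, k.2 + 1] ∨ q = [k.1, k.2 - 1])
theorem pvStepAInner_eq (L : Int × Int) (d : PySem.Dict (Int × Int) (List (Int × Int))) (pj : List Int) :
    pvStepAInner L d pj = if pvAdj L pj then d.modify L [] (· ++ [pvLab pj]) else d := by
  simp only [pvStepAInner, pvAdj, pyListEqPair, List.any_eq_false, decide_eq_true_eq]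
  split_ifs with h1 h2 <;> simp_all [pvLab]

theorem pvStepAInner_getD (L : Int × Int) (l : List (List Int)) (d : PySem.Dict (Int × Int) (List (Int × Int))) (k : Int × Int) :
    (l.foldl (pvStepAInner L) d).getD k [] =
      if k = L then d.getD L [] ++ (l.filter (pvAdj L)).map pvLab else d.getD k [] := by
  induction l generalizing d with
  | nil => simp; rintro rfl; rfl
  | cons q rest ih =>
    rw [List.foldl_cons, pvStepAInner_eq, ih]
    by_cases hadj : pvAdj L q
    · by_cases hk : k = L
      · subst hk
        simp [hadj]
      · simp [hadj, PySem.Dict.getD_modify, hk]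
    · simp [hadj]

theorem pvKeys_insert (d : PySem.Dict (Int × Int) (List (Int × Int))) (k : Int × Int) (v : List (Int × Int)) :
    (d.insert k v).keys = PySem.Set.add d.keys k := by
  by_cases h : d.contains k
  · rw [PySem.Dict.keys_insert_of_contains d v h,
        PySem.Set.add_of_mem ((PySem.Dict.contains_iff_mem_keys d k).mp h)]
  · rw [PySem.Dict.keys_insert_of_not_contains d v (by simpa using h),
        PySem.Set.add_of_not_mem]
    intro hm
    exact h ((PySem.Dict.contains_iff_mem_keys d k).mpr hm)

theorem pvStepAInner_keys (L : Int × Int) (l : List (List Int)) (d : PySem.Dict (Int × Int) (List (Int × Int)))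
    (h : L ∈ d.keys) : (l.foldl (pvStepAInner L) d).keys = d.keys := by
  induction l generalizing d with
  | nil => rfl
  | cons q rest ih =>
    rw [List.foldl_cons, pvStepAInner_eq]
    by_cases hadj : pvAdj L q
    · simp only [hadj, if_true]
      have hk : (d.modify L [] (· ++ [pvLab q])).keys = d.keys := by
        rw [PySem.Dict.keys_modify, pvKeys_insert, PySem.Set.add_of_mem h]
      rw [ih _ (by rw [hk]; exact h), hk]
    · simp only [hadj, if_false, Bool.false_eq_true]
      exact ih d h

def pvVal (pts : List (List Int)) (k : Int × Int) : List (Int × Int) :=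
  (pts.filter (pvAdj k)).map pvLab

def pvStepA (pts : List (List Int)) (d : PySem.Dict (Int × Int) (List (Int × Int))) (pi : List Int) :
    PySem.Dict (Int × Int) (List (Int × Int)) :=
  pts.foldl (pvStepAInner (pvLab pi)) (d.insert (pvLab pi) [])

theorem pvA_keys (pts l : List (List Int)) (d : PySem.Dict (Int × Int) (List (Int × Int))) :
    (l.foldl (pvStepA pts) d).keys = PySem.Set.update d.keys (l.map pvLab) := by
  induction l generalizing d with
  | nil => rfl
  | cons p rest ih =>
    have hks : (pvStepA pts d p).keys = PySem.Set.add d.keys (pvLab p) := by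
      rw [pvStepA, pvStepAInner_keys _ _ _ (by
        exact (PySem.Dict.contains_iff_mem_keys _ _).mp (PySem.Dict.contains_insert_self _ _ _)),
        pvKeys_insert]
    rw [List.foldl_cons, List.map_cons, PySem.Set.update_cons, ih, hks]

theorem pvA_getD (pts l : List (List Int)) (d : PySem.Dict (Int × Int) (List (Int × Int))) (k : Int × Int) :
    (l.foldl (pvStepA pts) d).getD k [] =
      if k ∈ l.map pvLab then pvVal pts k else d.getD k [] := by
  induction l generalizing d with
  | nil => simp
  | cons p rest ih =>
    rw [List.foldl_cons, ih]
    have hstep : (pvStepA pts d p).getD k [] =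
        if k = pvLab p then pvVal pts k else d.getD k [] := by
      rw [pvStepA, pvStepAInner_getD]
      by_cases hk : k = pvLab p
      · simp [hk, pvVal]
      · simp [hk, PySem.Dict.getD_insert]
    rw [hstep]
    by_cases h1 : k ∈ rest.map pvLab
    · simp [h1]
    · by_cases h2 : k = pvLab p <;> simp [h1, h2]

def pvStepB (d : PySem.Dict (Int × Int) (List (Int × Int))) (q : List Int) :
    PySem.Dict (Int × Int) (List (Int × Int)) :=
  match q with
  | [x, y] =>
    let d := if d.contains (x + 1, y) then d.modify (x + 1, y) [] (· ++ [(x, y)]) else d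
    let d := if d.contains (x - 1, y) then d.modify (x - 1, y) [] (· ++ [(x, y)]) else d
    let d := if d.contains (x, y + 1) then d.modify (x, y + 1) [] (· ++ [(x, y)]) else d
    if d.contains (x, y - 1) then d.modify (x, y - 1) [] (· ++ [(x, y)]) else d
  | _ => d

theorem pvCM_contains (d : PySem.Dict (Int × Int) (List (Int × Int))) (n k : Int × Int) (v : Int × Int) :
    (if d.contains n then d.modify n [] (· ++ [v]) else d).contains k = d.contains k := by
  split_ifs with h
  · rw [PySem.Dict.contains_modify]
    by_cases hk : k = n
    · subst hk; simp [h]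
    · simp [hk]
  · rfl

theorem pvCM_getD (d : PySem.Dict (Int × Int) (List (Int × Int))) (n k : Int × Int) (v : Int × Int) :
    (if d.contains n then d.modify n [] (· ++ [v]) else d).getD k [] =
      if k = n ∧ d.contains k then d.getD k [] ++ [v] else d.getD k [] := by
  split_ifs with h h2 h3
  · rcases h2 with ⟨rfl, _⟩; rw [PySem.Dict.getD_modify]; simp
  · rw [PySem.Dict.getD_modify]
    have : ¬ k = n := by rintro rfl; exact h2 ⟨rfl, h⟩
    simp [this]
  · rcases h3 with ⟨rfl, hc⟩; exact absurd hc h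
  · rfl

theorem pvStepB_contains (d : PySem.Dict (Int × Int) (List (Int × Int))) (q : List Int) (k : Int × Int) :
    (pvStepB d q).contains k = d.contains k := by
  rcases q with _ | ⟨x, _ | ⟨y, _ | ⟨z, t⟩⟩⟩ <;> try rfl
  show ((if _ then _ else _) : PySem.Dict (Int × Int) (List (Int × Int))).contains k = d.contains k
  rw [pvCM_contains, pvCM_contains, pvCM_contains, pvCM_contains]

theorem pvCM_keys (d : PySem.Dict (Int × Int) (List (Int × Int))) (n : Int × Int) (v : Int × Int) :
    (if d.contains n then d.modify n [] (· ++ [v]) else d).keys = d.keys := by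
  split_ifs with h
  · rw [PySem.Dict.keys_modify, PySem.Dict.keys_insert_of_contains _ _ h]
  · rfl

theorem pvStepB_keys (d : PySem.Dict (Int × Int) (List (Int × Int))) (q : List Int) :
    (pvStepB d q).keys = d.keys := by
  rcases q with _ | ⟨x, _ | ⟨y, _ | ⟨z, t⟩⟩⟩ <;> try rfl
  show ((if _ then _ else _) : PySem.Dict (Int × Int) (List (Int × Int))).keys = d.keys
  rw [pvCM_keys, pvCM_keys, pvCM_keys, pvCM_keys]

theorem pvFoldB_keys (l : List (List Int)) (d : PySem.Dict (Int × Int) (List (Int × Int))) :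
    (l.foldl pvStepB d).keys = d.keys := by
  induction l generalizing d with
  | nil => rfl
  | cons q rest ih => rw [List.foldl_cons, ih, pvStepB_keys]

theorem pvStepB_getD (d : PySem.Dict (Int × Int) (List (Int × Int))) (q : List Int) (k : Int × Int) :
    (pvStepB d q).getD k [] =
      if d.contains k ∧ pvAdj k q then d.getD k [] ++ [pvLab q] else d.getD k [] := by
  rcases q with _ | ⟨x, _ | ⟨y, _ | ⟨z, t⟩⟩⟩
  · simp [pvStepB, pvAdj]
  · simp [pvStepB, pvAdj]
  case cons.cons.nil =>
    have hlab : pvLab [x, y] = (x, y) := by simp [pvLab, pysem]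
    rw [hlab]
    show ((if _ then _ else _) : PySem.Dict (Int × Int) (List (Int × Int))).getD k [] = _
    rw [pvCM_getD, pvCM_contains, pvCM_contains, pvCM_contains,
        pvCM_getD, pvCM_contains, pvCM_contains,
        pvCM_getD, pvCM_contains,
        pvCM_getD]
    have hadj : (pvAdj k [x, y] = true) ↔
        (k = (x + 1, y) ∨ k = (x - 1, y) ∨ k = (x, y + 1) ∨ k = (x, y - 1)) := by
      simp [pvAdj, Prod.ext_iff]
      constructor <;> (rintro (⟨h1, h2⟩ | ⟨h1, h2⟩ | ⟨h1, h2⟩ | ⟨h1, h2⟩)) <;> omega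
    split_ifs <;> (simp_all [Prod.ext_iff, pvAdj] <;> omega)
  · simp [pvStepB, pvAdj]

theorem pvB_getD (l : List (List Int)) (d : PySem.Dict (Int × Int) (List (Int × Int))) (k : Int × Int) :
    (l.foldl pvStepB d).getD k [] =
      if d.contains k then d.getD k [] ++ (l.filter (pvAdj k)).map pvLab else d.getD k [] := by
  induction l generalizing d with
  | nil => simp
  | cons q rest ih =>
    rw [List.foldl_cons, ih, pvStepB_contains, pvStepB_getD, List.filter_cons]
    by_cases hc : d.contains k
    · by_cases ha : pvAdj k q <;> simp [hc, ha]
    · simp [hc]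

theorem pvIns_getD (l : List (List Int)) (d : PySem.Dict (Int × Int) (List (Int × Int))) (k : Int × Int)
    (h : d.getD k [] = []) :
    (l.foldl (fun d p => d.insert (pvLab p) []) d).getD k [] = [] := by
  induction l generalizing d with
  | nil => exact h
  | cons p rest ih =>
    rw [List.foldl_cons]
    refine ih _ ?_
    rw [PySem.Dict.getD_insert]
    split_ifs with hk
    · rfl
    · exact h

theorem pvAStep_eq (pts : List (List Int)) (d : PySem.Dict (Int × Int) (List (Int × Int))) (pi : List Int) :
    pvAStep pts d pi = pvStepA pts d pi := by
  unfold pvAStep pvStepA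
  rw [PySem.List.foldl_pyRange_pyGetD' pts [] _ _ (le_refl 0)]
  simp only [Int.toNat_zero, List.drop_zero]
  rfl

theorem pvA_eq (pts : List (List Int)) :
    plot_point_next_steps pts =
      (pts.foldl (pvStepA pts) PySem.Dict.empty).items.map (fun kv => (kv.1.1, kv.1.2, kv.2)) := by
  unfold plot_point_next_steps
  have h : pvAStep pts = pvStepA pts := by
    funext d pi; exact pvAStep_eq pts d pi
  rw [PySem.List.foldl_pyRange_pyGetD' pts [] (pvAStep pts) _ (le_refl 0)]
  simp only [Int.toNat_zero, List.drop_zero]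
  rw [h]

def pvOut1 (pts : List (List Int)) : PySem.Dict (Int × Int) (List (Int × Int)) :=
  pts.foldl (fun d p => d.insert (pvLab p) []) PySem.Dict.empty

theorem pvB_eq (pts : List (List Int)) :
    plot_point_next_steps_alt pts =
      ((pts.foldl pvStepB (pvOut1 pts)).items).map (fun kv => (kv.1.1, kv.1.2, kv.2)) := by
  rfl

theorem pvOut1_keys (pts : List (List Int)) :
    (pvOut1 pts).keys = PySem.Set.ofList (pts.map pvLab) := by
  rw [pvOut1, PySem.Dict.keys_foldl_insert_key pts pvLab (fun _ _ => []) PySem.Dict.empty,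
      PySem.Dict.keys_empty, PySem.Set.update_nil_left]

-- ===== VERDICT (by name: the statement is the Claim_ definition above) =====
theorem plot_point_next_steps_spec : Claim_equal_plot_point_next_steps := by
  intro pts hdom hpre
  unfold Spec_plot_point_next_steps
  rw [pvA_eq, pvB_eq]
  have hkA : (pts.foldl (pvStepA pts) PySem.Dict.empty).keys = PySem.Set.ofList (pts.map pvLab) := by
    rw [pvA_keys, PySem.Dict.keys_empty, PySem.Set.update_nil_left]
  have hkB : (pts.foldl pvStepB (pvOut1 pts)).keys = PySem.Set.ofList (pts.map pvLab) := by
    rw [pvFoldB_keys, pvOut1_keys]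
  congr 1
  rw [PySem.Dict.items_eq_map_keys _ (by rw [hkA]; exact PySem.Set.nodup_ofList _) [],
      PySem.Dict.items_eq_map_keys _ (by rw [hkB]; exact PySem.Set.nodup_ofList _) [],
      hkA, hkB]
  refine List.map_congr_left (fun k hk => ?_)
  have hkmem : k ∈ pts.map pvLab := (PySem.Set.mem_ofList _ _).mp hk
  have hA : (pts.foldl (pvStepA pts) PySem.Dict.empty).getD k [] = pvVal pts k := by
    rw [pvA_getD, if_pos hkmem]
  have hcont : (pvOut1 pts).contains k = true := by
    rw [PySem.Dict.contains_iff_mem_keys, pvOut1_keys]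
    exact (PySem.Set.mem_ofList _ _).mpr hkmem
  have hB : (pts.foldl pvStepB (pvOut1 pts)).getD k [] = pvVal pts k := by
    rw [pvB_getD, if_pos hcont, pvOut1, pvIns_getD pts PySem.Dict.empty k rfl, List.nil_append]
    rfl
  rw [hA, hB]
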